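-- pv_equiv track=rewrite | github.com/nlao1/advent-of-code-24 | 07/solution.py | part1
-- ===== SOURCE A (Python) =====
-- from typing import List, Tuple
--
-- def part1(input: List[Tuple[int, List[int]]]) -> int:
--     answer = 0
--
--     def test(goal, nums: List[int]):
--         if len(nums) == 1:
--             return goal == nums[0]
--         last_num = nums.pop()
--         add = test(goal - last_num, nums[:])
--         multiply = False
--         if goal % last_num == 0:
--             multiply = test(goal // last_num, nums[:])
--         return add or multiply
--
--     for goal, nums in input:
--         if test(goal, nums):
--             answer += goal
--     return answer
-- ===== SOURCE B (Python) =====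
-- from typing import List, Tuple
--
-- def part1(input: List[Tuple[int, List[int]]]) -> int:
--     answer = 0
--     for goal, nums in input:
--         if len(nums) == 1:
--             ok = goal == nums[0]
--         else:
--             last = nums.pop()  # peel the final operand (same mutation as A)
--             # iterative backward pass: the set of values still to be produced,
--             # un-applying operands from the last down to the second
--             goals = {goal}
--             for n in [last] + nums[:0:-1]:
--                 ng = {g - n for g in goals}
--                 ng |= {g // n for g in goals if g % n == 0}
--                 goals = ng
--             ok = nums[0] in goals
--         if ok:
--             answer += goal
--     return answer
-- ===== Notes on version B (the rewrite author's own statement) =====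
-- stated objective: alternative
-- what changed: Replaces A's top-down divide-down recursion (which copies the operand list at every level and revisits equal subgoals separately) with an iterative backward pass maintaining one deduplicated set of pending goals, answered by a final membership test.
import Mathlib
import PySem

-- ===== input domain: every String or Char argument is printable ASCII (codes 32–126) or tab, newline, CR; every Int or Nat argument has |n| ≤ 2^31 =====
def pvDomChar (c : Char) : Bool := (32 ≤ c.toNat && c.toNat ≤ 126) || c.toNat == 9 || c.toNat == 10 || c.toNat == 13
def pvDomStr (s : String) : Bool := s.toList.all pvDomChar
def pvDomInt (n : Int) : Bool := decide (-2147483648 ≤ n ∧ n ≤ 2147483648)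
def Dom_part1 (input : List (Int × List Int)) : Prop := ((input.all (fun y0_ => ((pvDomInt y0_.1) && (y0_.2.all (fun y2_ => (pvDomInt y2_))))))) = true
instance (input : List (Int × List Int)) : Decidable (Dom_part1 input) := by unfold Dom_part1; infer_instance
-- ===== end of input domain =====

-- B replaces A's goal-dividing recursion (one list copy per level) by an iterative
-- backward pass over a deduplicated frontier set of pending goals; same return values on
-- Pre_, and both pop the last operand off each list of length ≥ 2, so mutation matches.


-- ===== PORT A =====
-- A's inner 'test': pops the last operand, recurses on a copy; multiply branch only on divisibility.
def part1_test (goal : Int) (nums : List Int) : Bool :=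
  if nums.length = 1 then goal == nums.headI
  else
    match hl : nums.getLast? with
    | none => false  -- Python: nums.pop() raises IndexError on []; excluded by Pre_
    | some last =>
      let add := part1_test (goal - last) nums.dropLast
      let multiply :=
        if PySem.Int.mod goal last = 0 then
          part1_test (PySem.Int.floordiv goal last) nums.dropLast
        else false
      add || multiply
termination_by nums.length
decreasing_by
  all_goals
    (have h : nums ≠ [] := by rintro rfl; simp at hl
     have := List.length_pos_iff.mpr h
     simp [List.length_dropLast]; omega)

def part1 (input : List (Int × List Int)) : Int :=
  input.foldl (fun answer p => if part1_test p.1 p.2 then answer + p.1 else answer) 0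

-- ===== PORT B =====
-- one backward step: goals = {g-n for g in goals} | {g//n for g in goals if g%n==0}
def part1_step (goals : PySem.Set Int) (n : Int) : PySem.Set Int :=
  PySem.Set.union (PySem.Set.ofList (goals.map (fun g => g - n)))
    ((goals.filter (fun g => PySem.Int.mod g n == 0)).map (fun g => PySem.Int.floordiv g n))

def part1_ok (goal : Int) (nums : List Int) : Bool :=
  if nums.length = 1 then goal == nums.headI
  else
    match nums.getLast? with
    | none => false  -- Python B: nums.pop() raises IndexError on []; excluded by Pre_
    | some last =>
      let body := nums.dropLast
      -- [last] + nums[:0:-1] : the operands from the last one down to the second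
      let goals := (last :: body.tail.reverse).foldl part1_step (PySem.Set.ofList [goal])
      PySem.Set.contains goals body.headI

def part1_alt (input : List (Int × List Int)) : Int :=
  input.foldl (fun answer p => if part1_ok p.1 p.2 then answer + p.1 else answer) 0

-- ===== PRECONDITION & SPEC =====
-- Pre_ excludes exactly the inputs on which A raises: a pair with an empty operand list
-- (IndexError from nums.pop()) or with a 0 after the first operand (ZeroDivisionError:
-- A's always-taken add branch makes every trailing operand a divisor).
def Pre_part1 (input : List (Int × List Int)) : Prop :=
  ∀ p ∈ input, p.2 ≠ [] ∧ ∀ x ∈ p.2.tail, x ≠ 0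
instance (input : List (Int × List Int)) : Decidable (Pre_part1 input) := by unfold Pre_part1; infer_instance
def pvWitness_part1 : (List (Int × List Int)) := [(190, [10, 19]), (83, [17, 5]), (292, [11, 6, 16, 20])]

def Spec_part1 (input : List (Int × List Int)) (out : Int) : Prop := out = part1_alt input
instance (input : List (Int × List Int)) (out : Int) : Decidable (Spec_part1 input out) := by unfold Spec_part1; infer_instance

-- ===== CLAIM (what is proved, stated in full; the proofs are below) =====
def Claim_equal_part1 : Prop := ∀ (input : List (Int × List Int)), Dom_part1 input → Pre_part1 input → Spec_part1 input (part1 input)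


-- ===== LEMMAS AND PROOFS =====

-- unfolding A's test once when the list has >= 2 elements, written tail-first
lemma part1_test_concat (goal : Int) (xs : List Int) (b : Int) (h : xs ≠ []) :
    part1_test goal (xs ++ [b]) =
      (part1_test (goal - b) xs ||
        if PySem.Int.mod goal b = 0 then part1_test (PySem.Int.floordiv goal b) xs
        else false) := by
  have hlen : (xs ++ [b]).length ≠ 1 := by
    have := List.length_pos_iff.mpr h; simp; omega
  rw [part1_test]
  rw [if_neg hlen]
  split
  · next hnone => simp at hnone
  · next last hsome =>
    rw [List.getLast?_concat] at hsome
    cases hsome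
    simp

lemma mem_part1_step {S : PySem.Set Int} {b g' : Int} :
    g' ∈ part1_step S b ↔
      ∃ g ∈ S, g' = g - b ∨ (PySem.Int.mod g b = 0 ∧ g' = PySem.Int.floordiv g b) := by
  unfold part1_step
  rw [PySem.Set.mem_union, PySem.Set.mem_ofList]
  simp only [List.mem_map, List.mem_filter, beq_iff_eq]
  constructor
  · rintro (⟨g, hg, rfl⟩ | ⟨g, ⟨hg, hm⟩, rfl⟩)
    · exact ⟨g, hg, Or.inl rfl⟩
    · exact ⟨g, hg, Or.inr ⟨hm, rfl⟩⟩
  · rintro ⟨g, hg, (rfl | ⟨hm, rfl⟩)⟩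
    · exact Or.inl ⟨g, hg, rfl⟩
    · exact Or.inr ⟨g, ⟨hg, hm⟩, rfl⟩

-- the backward frontier over the reversed tail holds the first operand
-- iff some pending goal passes A's divide-down test
lemma mem_frontier_iff_test (body : List Int) :
    ∀ (S : PySem.Set Int) (first : Int),
      (first ∈ body.reverse.foldl part1_step S ↔
        ∃ g ∈ S, part1_test g (first :: body) = true) := by
  induction body using List.reverseRecOn with
  | nil =>
    intro S first
    simp only [List.reverse_nil, List.foldl_nil]
    constructor
    · intro h
      exact ⟨first, h, by rw [part1_test]; simp⟩
    · rintro ⟨g, hg, h⟩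
      rw [part1_test] at h
      simp at h
      exact h ▸ hg
  | append_singleton bs b ih =>
    intro S first
    rw [List.reverse_append, List.reverse_singleton, List.singleton_append,
      List.foldl_cons, ih]
    have hc : ∀ g : Int, part1_test g (first :: (bs ++ [b])) =
        part1_test g ((first :: bs) ++ [b]) := by intro g; rfl
    constructor
    · rintro ⟨g', hg', htest⟩
      rcases mem_part1_step.mp hg' with ⟨g, hg, (rfl | ⟨hm, rfl⟩)⟩
      · refine ⟨g, hg, ?_⟩
        rw [hc, part1_test_concat _ _ _ (by simp), htest]
        simp
      · refine ⟨g, hg, ?_⟩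
        rw [hc, part1_test_concat _ _ _ (by simp), hm]
        simp [htest]
    · rintro ⟨g, hg, htest⟩
      rw [hc, part1_test_concat _ _ _ (by simp)] at htest
      rcases Bool.or_eq_true_iff.mp htest with h | h
      · exact ⟨g - b, mem_part1_step.mpr ⟨g, hg, Or.inl rfl⟩, h⟩
      · by_cases hm : PySem.Int.mod g b = 0
        · simp only [hm, if_true] at h
          exact ⟨PySem.Int.floordiv g b, mem_part1_step.mpr ⟨g, hg, Or.inr ⟨hm, rfl⟩⟩, h⟩
        · simp [hm] at h

-- pointwise agreement of the two per-pair tests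
lemma test_eq_ok (goal : Int) (nums : List Int) :
    part1_test goal nums = part1_ok goal nums := by
  match nums with
  | [] => rw [part1_test, part1_ok]; simp
  | [a] => rw [part1_test, part1_ok]; simp
  | first :: rest =>
    rcases List.eq_nil_or_concat rest with rfl | ⟨ys, b, rfl⟩
    · rw [part1_test, part1_ok]; simp
    · simp only [List.concat_eq_append]
      have hcons : first :: (ys ++ [b]) = (first :: ys) ++ [b] := by simp
      have hlen : (first :: (ys ++ [b])).length ≠ 1 := by simp
      have hok : part1_ok goal (first :: (ys ++ [b])) =
          PySem.Set.contains
            ((b :: ys.reverse).foldl part1_step (PySem.Set.ofList [goal])) first := by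
        rw [part1_ok]
        rw [if_neg hlen]
        simp only [hcons, List.getLast?_concat, List.dropLast_concat]
        simp
      have hrev : (ys ++ [b]).reverse = b :: ys.reverse := by simp
      rw [hok, Bool.eq_iff_iff, PySem.Set.contains_iff, ← hrev,
        mem_frontier_iff_test (ys ++ [b]) (PySem.Set.ofList [goal]) first]
      constructor
      · intro h; exact ⟨goal, by simp [PySem.Set.ofList], h⟩
      · rintro ⟨g, hg, h⟩
        have : g = goal := by simpa [PySem.Set.ofList] using hg
        exact this ▸ h

lemma fold_eq (input : List (Int × List Int)) :
    ∀ acc : Int,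
      input.foldl (fun answer p => if part1_test p.1 p.2 then answer + p.1 else answer) acc =
      input.foldl (fun answer p => if part1_ok p.1 p.2 then answer + p.1 else answer) acc := by
  induction input with
  | nil => intro acc; rfl
  | cons p ps ih =>
    intro acc
    simp only [List.foldl_cons]
    rw [test_eq_ok p.1 p.2]
    exact ih _

-- ===== VERDICT (by name: the statement is the Claim_ definition above) =====
theorem part1_spec : Claim_equal_part1 := by
  intro input _ _
  unfold Spec_part1 part1 part1_alt
  exact fold_eq input 0
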